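-- pv_equiv track=rewrite | github.com/hansrajdas/algorithms | Level-4/knapsack_maximize_weight.py | knapsack_maximize_weight
-- ===== SOURCE A (Python) =====
-- def knapsack_maximize_weight(weights, W):
--     n = len(weights)
--     dp = [[None] * (W + 1) for _ in range(n + 1)]
--
--     for item in range(n + 1):
--         for weight in range(W + 1):
--             if not item:  # No items
--                 dp[item][weight] = 0
--             elif not weight:  # Weight of given knapsack is 0
--                 dp[item][weight] = 0
--             elif weights[item - 1] <= weight:  # Can current item be accommodated in current knapsack size (weight).
--                 dp[item][weight] = max(
--                     dp[item - 1][weight],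
--                     weights[item - 1] + dp[item - 1][weight - weights[item - 1]])
--             else:
--                 dp[item][weight] = dp[item - 1][weight]
--
--     return dp[item][W]
-- ===== SOURCE B (Python) =====
-- def knapsack_maximize_weight(weights, W):
--     reachable = {0}
--     for w in weights:
--         for s in list(reachable):
--             t = s + w
--             if 0 <= t <= W:
--                 reachable.add(t)
--     return max(reachable)
-- ===== Notes on version B (the rewrite author's own statement) =====
-- stated objective: simpler
-- what changed: Replaces the (n+1)x(W+1) dynamic-programming table with a single set of reachable subset weights (start {0}; for each item, add s+w for every snapshot element s with 0<=s+w<=W; return the set's maximum).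
import Mathlib
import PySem

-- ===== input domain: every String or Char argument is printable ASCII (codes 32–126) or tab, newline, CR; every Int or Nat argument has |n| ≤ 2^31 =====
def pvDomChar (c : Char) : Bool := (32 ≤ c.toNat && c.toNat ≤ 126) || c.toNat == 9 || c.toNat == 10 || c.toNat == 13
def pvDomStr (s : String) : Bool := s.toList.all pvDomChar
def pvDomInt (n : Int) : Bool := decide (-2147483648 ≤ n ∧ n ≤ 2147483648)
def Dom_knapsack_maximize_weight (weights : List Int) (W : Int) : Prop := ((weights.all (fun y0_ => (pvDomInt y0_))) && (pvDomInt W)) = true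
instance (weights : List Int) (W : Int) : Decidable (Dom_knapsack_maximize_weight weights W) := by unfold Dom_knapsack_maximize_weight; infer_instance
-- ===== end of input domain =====

-- B replaces A's (n+1)x(W+1) DP table by a set of reachable subset weights (simpler, shorter).


-- ===== PORT A =====
-- one row of A's table: for weight in range(W+1) compute dp[item][weight] from the previous row
def pvRowA (weights : List Int) (prev : List Int) (item : Int) (W : Int) : List Int :=
  (PySem.List.pyRange 0 (W + 1)).foldl
    (fun row weight =>
      row ++ [ if item = 0 then 0
               else if weight = 0 then 0
               else
                 let w := PySem.List.pyGetD weights (item - 1) 0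
                 if w ≤ weight then
                   max (PySem.List.pyGetD prev weight 0)
                       (w + PySem.List.pyGetD prev (weight - w) 0)
                 else PySem.List.pyGetD prev weight 0 ]) []

-- for item in range(n+1): dp.append(row for item, read from dp[item-1])
def pvStepA (weights : List Int) (W : Int) : List (List Int) → Int → List (List Int) :=
  fun dp item => dp ++ [pvRowA weights (PySem.List.pyGetD dp (item - 1) []) item W]

def knapsack_maximize_weight (weights : List Int) (W : Int) : Int :=
  let n : Int := weights.length
  let dp := (PySem.List.pyRange 0 (n + 1)).foldl (pvStepA weights W) []
  -- return dp[item][W]  (after the loop, item = n; the loop always runs since n ≥ 0)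
  PySem.List.pyGetD (PySem.List.pyGetD dp n []) W 0

-- ===== PORT B =====
def knapsack_maximize_weight_alt (weights : List Int) (W : Int) : Int :=
  let reachable : PySem.Set Int := weights.foldl
    (fun r w =>
      -- for s in list(reachable): snapshot r, accumulate additions into the same set
      r.foldl (fun r2 s =>
        if 0 ≤ s + w ∧ s + w ≤ W then PySem.Set.add r2 (s + w) else r2) r)
    (PySem.Set.ofList [0])
  match PySem.List.max? reachable (fun x => x) with
  | some m => m
  | none => 0   -- unreachable: 0 is always in the set

-- ===== PRECONDITION & SPEC =====
-- Pre_ excludes exactly the inputs where A raises IndexError: a negative capacity W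
-- (empty table rows), or a positive capacity with a negative weight (the row index
-- weight - weights[item-1] overruns the row; with W = 0 that read is never reached).
def Pre_knapsack_maximize_weight (weights : List Int) (W : Int) : Prop :=
  0 ≤ W ∧ (W = 0 ∨ ∀ w ∈ weights, 0 ≤ w)
instance (weights : List Int) (W : Int) : Decidable (Pre_knapsack_maximize_weight weights W) := by
  unfold Pre_knapsack_maximize_weight; infer_instance
def pvWitness_knapsack_maximize_weight : List Int × Int := ([1, 3, 4, 5], 7)

def Spec_knapsack_maximize_weight (weights : List Int) (W : Int) (out : Int) : Prop := out = knapsack_maximize_weight_alt weights W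
instance (weights : List Int) (W : Int) (out : Int) : Decidable (Spec_knapsack_maximize_weight weights W out) := by unfold Spec_knapsack_maximize_weight; infer_instance

-- ===== CLAIM (what is proved, stated in full; the proofs are below) =====
def Claim_equal_knapsack_maximize_weight : Prop := ∀ (weights : List Int) (W : Int), Dom_knapsack_maximize_weight weights W → Pre_knapsack_maximize_weight weights W → Spec_knapsack_maximize_weight weights W (knapsack_maximize_weight weights W)

-- ===== LEMMAS AND PROOFS =====

-- the mathematical yardstick both ports are reduced to: the best subset sum of l not exceeding c,
-- with items taken head-first (A's table row i handles the reversed length-i prefix)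
def bestR : List Int → Int → Int
  | [], _ => 0
  | w :: ws, c => if w ≤ c then max (bestR ws c) (w + bestR ws (c - w)) else bestR ws c

lemma sum_nonneg_of_sublist {t l : List Int} (h : t.Sublist l) (hnn : ∀ w ∈ l, 0 ≤ w) :
    0 ≤ t.sum :=
  List.sum_nonneg fun x hx => hnn x (h.subset hx)

lemma bestR_zero (l : List Int) (hnn : ∀ w ∈ l, 0 ≤ w) : bestR l 0 = 0 := by
  induction l with
  | nil => rfl
  | cons w ws ih =>
    have hw : 0 ≤ w := hnn w List.mem_cons_self
    have ih' := ih (fun x hx => hnn x (List.mem_cons_of_mem _ hx))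
    by_cases h : w ≤ 0
    · have : w = 0 := le_antisymm h hw
      subst this; simp [bestR, ih']
    · simp [bestR, h, ih']

-- bestR l c is attained by some sublist of l whose sum stays within c …
lemma bestR_exists (l : List Int) : ∀ (c : Int), 0 ≤ c → (∀ w ∈ l, 0 ≤ w) →
    ∃ t : List Int, t.Sublist l ∧ bestR l c = t.sum ∧ bestR l c ≤ c := by
  induction l with
  | nil => intro c hc _; exact ⟨[], List.Sublist.refl _, rfl, hc⟩
  | cons w ws ih =>
    intro c hc hnn
    have hw : 0 ≤ w := hnn w List.mem_cons_self
    have hnn' : ∀ x ∈ ws, 0 ≤ x := fun x hx => hnn x (List.mem_cons_of_mem _ hx)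
    by_cases h : w ≤ c
    · obtain ⟨t1, ht1, he1, hle1⟩ := ih c hc hnn'
      obtain ⟨t2, ht2, he2, hle2⟩ := ih (c - w) (by omega) hnn'
      rcases max_cases (bestR ws c) (w + bestR ws (c - w)) with ⟨hm, _⟩ | ⟨hm, _⟩
      · refine ⟨t1, ht1.cons w, ?_, ?_⟩ <;> simp only [bestR, if_pos h, hm]
        · exact he1
        · omega
      · refine ⟨w :: t2, ht2.cons₂ w, ?_, ?_⟩ <;> simp only [bestR, if_pos h, hm]
        · simp [he2]
        · omega
    · obtain ⟨t1, ht1, he1, hle1⟩ := ih c hc hnn'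
      exact ⟨t1, ht1.cons w, by simp [bestR, h, he1], by simp [bestR, h]; omega⟩

-- … and it dominates the sum of every sublist of l that stays within c
lemma bestR_ub (l : List Int) : ∀ (c : Int), (∀ w ∈ l, 0 ≤ w) →
    ∀ t : List Int, t.Sublist l → t.sum ≤ c → t.sum ≤ bestR l c := by
  induction l with
  | nil => intro c _ t ht hle; simp [List.sublist_nil.mp ht, bestR]
  | cons w ws ih =>
    intro c hnn t ht hle
    have hw : 0 ≤ w := hnn w List.mem_cons_self
    have hnn' : ∀ x ∈ ws, 0 ≤ x := fun x hx => hnn x (List.mem_cons_of_mem _ hx)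
    rcases List.sublist_cons_iff.mp ht with h | ⟨r, rfl, hr⟩
    · have := ih c hnn' t h hle
      by_cases hwc : w ≤ c
      · simp [bestR, hwc]; left; omega
      · simpa [bestR, hwc] using this
    · have hrs : 0 ≤ r.sum := sum_nonneg_of_sublist hr hnn'
      have hwc : w ≤ c := by simp at hle; omega
      have := ih (c - w) hnn' r hr (by simp at hle; omega)
      simp [bestR, hwc]
      right; omega

-- ---- A side: the table rows are pointwise bestR of the reversed prefix ----

lemma getD_row (f : Int → Int) (W c : Int) (h0 : 0 ≤ c) (h1 : c ≤ W) :
    PySem.List.pyGetD ((PySem.List.pyRange 0 (W + 1)).map f) c 0 = f c := by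
  obtain ⟨n, hn⟩ : ∃ n : Nat, W + 1 = (n:Int) := ⟨(W+1).toNat, by omega⟩
  obtain ⟨k, hk⟩ : ∃ k : Nat, c = (k:Int) := ⟨c.toNat, by omega⟩
  rw [hn, hk]
  exact PySem.List.pyGetD_map_pyRange f n k 0 (by omega)

lemma rowA_zero (weights prev : List Int) (W : Int) :
    pvRowA weights prev 0 W = (PySem.List.pyRange 0 (W + 1)).map (fun c => bestR [] c) := by
  unfold pvRowA
  rw [PySem.List.foldl_append_singleton_eq_map, List.nil_append]
  apply List.map_congr_left
  intro c _
  simp [bestR]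

lemma rowA_eq (weights : List Int) (W : Int) (i : Nat) (hi : i ≤ weights.length)
    (_hW : 0 ≤ W) (hnn : ∀ w ∈ weights, 0 ≤ w) :
    pvRowA weights
      ((PySem.List.pyRange 0 (W + 1)).map (fun c => bestR ((weights.take (i - 1)).reverse) c))
      (i : Int) W
    = (PySem.List.pyRange 0 (W + 1)).map (fun c => bestR ((weights.take i).reverse) c) := by
  unfold pvRowA
  rw [PySem.List.foldl_append_singleton_eq_map]
  rw [List.nil_append]
  apply List.map_congr_left
  intro c hc
  rw [PySem.List.mem_pyRange_one] at hc
  cases i with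
  | zero => simp [bestR]
  | succ j =>
    have hj : j < weights.length := by omega
    have hitem : ((j+1 : Nat) : Int) ≠ 0 := by omega
    have hwj : PySem.List.pyGetD weights ((j:Int)) 0 = weights[j] := by
      rw [PySem.List.pyGetD_natCast, List.getD_eq_getElem _ _ hj]
    have htake : (weights.take (j+1)).reverse = weights[j] :: (weights.take j).reverse := by
      rw [List.take_add_one, List.getElem?_eq_getElem hj]
      simp
    have hsub : ∀ x ∈ (weights.take (j+1)).reverse, 0 ≤ x := by
      intro x hx
      exact hnn x (List.take_subset _ _ (List.mem_reverse.mp hx))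
    have hwj0 : 0 ≤ weights[j] := hnn _ (List.getElem_mem hj)
    have hpred : ((j+1:Nat)) - 1 = (j : Int) := by omega
    simp only [if_neg hitem, hpred, hwj, Nat.add_sub_cancel]
    by_cases hc0 : c = 0
    · subst hc0
      rw [if_pos rfl]
      exact (bestR_zero _ hsub).symm
    · rw [if_neg hc0, htake]
      simp only [bestR]
      by_cases hwc : weights[j] ≤ c
      · rw [if_pos hwc, if_pos hwc,
          getD_row _ W c (by omega) (by omega),
          getD_row _ W (c - weights[j]) (by omega) (by omega)]
      · rw [if_neg hwc, if_neg hwc, getD_row _ W c (by omega) (by omega)]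

lemma dpA_eq (weights : List Int) (W : Int) (hW : 0 ≤ W) (hnn : ∀ w ∈ weights, 0 ≤ w) :
    ∀ (k : Nat), k ≤ weights.length + 1 →
    (PySem.List.pyRange 0 (k : Int)).foldl (pvStepA weights W) []
    = (List.range k).map
        (fun i => (PySem.List.pyRange 0 (W + 1)).map (fun c => bestR ((weights.take i).reverse) c)) := by
  intro k
  induction k with
  | zero => intro _; rw [PySem.List.pyRange_one_eq_nil (by omega)]; simp
  | succ k ih =>
    intro hk
    have hk' : k ≤ weights.length + 1 := by omega
    have hcast : ((k+1 : Nat) : Int) = (k : Int) + 1 := by omega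
    rw [hcast, PySem.List.pyRange_one_succ_right (by omega), List.foldl_append,
      List.foldl_cons, List.foldl_nil, ih hk', List.range_succ, List.map_append]
    unfold pvStepA
    cases k with
    | zero =>
      simp only [Nat.cast_zero, List.range_zero, List.map_nil]
      rw [rowA_zero]
      simp
    | succ j =>
      have hj1 : j + 1 ≤ weights.length := by omega
      have hidx : ((j+1 : Nat) : Int) - 1 = ((j : Nat) : Int) := by omega
      rw [hidx, PySem.List.pyGetD_natCast,
        List.getD_eq_getElem _ _ (by simp), List.getElem_map, List.getElem_range,
        List.map_singleton]
      have := rowA_eq weights W (j+1) hj1 hW hnn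
      rw [Nat.add_sub_cancel] at this
      rw [this]

lemma A_eq_bestR (weights : List Int) (W : Int) (hW : 0 ≤ W) (hnn : ∀ w ∈ weights, 0 ≤ w) :
    knapsack_maximize_weight weights W = bestR weights.reverse W := by
  show PySem.List.pyGetD (PySem.List.pyGetD
      ((PySem.List.pyRange 0 ((weights.length : Int) + 1)).foldl (pvStepA weights W) [])
      (weights.length : Int) []) W 0 = bestR weights.reverse W
  have hcast : ((weights.length : Int) + 1) = ((weights.length + 1 : Nat) : Int) := by omega
  rw [hcast, dpA_eq weights W hW hnn (weights.length + 1) le_rfl,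
    PySem.List.pyGetD_natCast,
    List.getD_eq_getElem _ _ (by simp), List.getElem_map, List.getElem_range,
    List.take_length,
    getD_row _ W W hW le_rfl]

-- ---- A side, W = 0: every row is [0] whatever the weights are ----

lemma rowA_W0 (weights prev : List Int) (item : Int) :
    pvRowA weights prev item 0 = [0] := by
  unfold pvRowA
  rw [show (PySem.List.pyRange 0 (0 + 1)) = [0] from PySem.List.pyRange_one_singleton 0]
  by_cases h : item = 0 <;> simp [h]

lemma dpA_W0 (weights : List Int) :
    ∀ (l : List Int) (acc : List (List Int)),
    l.foldl (pvStepA weights 0) acc = acc ++ List.replicate l.length [0] := by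
  intro l
  induction l with
  | nil => intro acc; simp
  | cons a t ih =>
    intro acc
    rw [List.foldl_cons]
    show List.foldl (pvStepA weights 0) (acc ++ [pvRowA weights _ a 0]) t = _
    rw [rowA_W0, ih]
    simp [List.replicate_succ]

lemma A_W0 (weights : List Int) : knapsack_maximize_weight weights 0 = 0 := by
  show PySem.List.pyGetD (PySem.List.pyGetD
      ((PySem.List.pyRange 0 ((weights.length : Int) + 1)).foldl (pvStepA weights 0) [])
      (weights.length : Int) []) 0 0 = 0
  rw [dpA_W0, List.nil_append, PySem.List.pyGetD_natCast,
    List.getD_eq_getElem _ _ (by simp [PySem.List.length_pyRange_one]),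
    List.getElem_replicate]
  rfl

-- ---- B side: the set holds exactly the sublist sums that fit in [0, W] ----

lemma mem_inner (r0 : PySem.Set Int) (snap : List Int) (w W : Int) (x : Int) :
    x ∈ snap.foldl (fun r2 s =>
        if 0 ≤ s + w ∧ s + w ≤ W then PySem.Set.add r2 (s + w) else r2) r0
    ↔ x ∈ r0 ∨ ∃ s ∈ snap, 0 ≤ s + w ∧ s + w ≤ W ∧ x = s + w := by
  induction snap generalizing r0 with
  | nil => simp
  | cons a t ih =>
    simp only [List.foldl_cons, ih]
    by_cases h : 0 ≤ a + w ∧ a + w ≤ W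
    · simp only [if_pos h, PySem.Set.mem_add]
      constructor
      · rintro (⟨hx | rfl⟩ | hx)
        · exact Or.inl hx
        · exact Or.inr ⟨a, List.mem_cons_self, h.1, h.2, rfl⟩
        · obtain ⟨s, hs, h1, h2, rfl⟩ := hx
          exact Or.inr ⟨s, List.mem_cons_of_mem _ hs, h1, h2, rfl⟩
      · rintro (hx | ⟨s, hs, h1, h2, rfl⟩)
        · exact Or.inl (Or.inl hx)
        · rcases List.mem_cons.mp hs with rfl | hs
          · exact Or.inl (Or.inr rfl)
          · exact Or.inr ⟨s, hs, h1, h2, rfl⟩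
    · simp only [if_neg h]
      constructor
      · rintro (hx | ⟨s, hs, h1, h2, rfl⟩)
        · exact Or.inl hx
        · exact Or.inr ⟨s, List.mem_cons_of_mem _ hs, h1, h2, rfl⟩
      · rintro (hx | ⟨s, hs, h1, h2, rfl⟩)
        · exact Or.inl hx
        · rcases List.mem_cons.mp hs with rfl | hs
          · exact absurd ⟨h1, h2⟩ h
          · exact Or.inr ⟨s, hs, h1, h2, rfl⟩

lemma mem_B_fold (ws : List Int) (W : Int) :
    ∀ (r : PySem.Set Int), (∀ w ∈ ws, 0 ≤ w) → (∀ x ∈ r, 0 ≤ x ∧ x ≤ W) → ∀ x,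
    (x ∈ ws.foldl (fun r w =>
          r.foldl (fun r2 s =>
            if 0 ≤ s + w ∧ s + w ≤ W then PySem.Set.add r2 (s + w) else r2) r) r
    ↔ ∃ s ∈ r, ∃ t : List Int, t.Sublist ws ∧ x = s + t.sum ∧ x ≤ W) := by
  induction ws with
  | nil =>
    intro r _ hr x
    simp only [List.foldl_nil]
    constructor
    · intro hx
      exact ⟨x, hx, [], List.Sublist.refl _, by simp, (hr x hx).2⟩
    · rintro ⟨s, hs, t, ht, rfl, _⟩
      simpa [List.sublist_nil.mp ht] using hs
  | cons w t ih =>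
    intro r hnn hr x
    have hw : 0 ≤ w := hnn w List.mem_cons_self
    have hnn' : ∀ y ∈ t, 0 ≤ y := fun y hy => hnn y (List.mem_cons_of_mem _ hy)
    set r' := r.foldl (fun r2 s =>
      if 0 ≤ s + w ∧ s + w ≤ W then PySem.Set.add r2 (s + w) else r2) r with hr'def
    have hmem' : ∀ y, y ∈ r' ↔ y ∈ r ∨ ∃ s ∈ r, 0 ≤ s + w ∧ s + w ≤ W ∧ y = s + w :=
      fun y => mem_inner r r w W y
    have hr' : ∀ y ∈ r', 0 ≤ y ∧ y ≤ W := by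
      intro y hy
      rcases (hmem' y).mp hy with h | ⟨s, _, h1, h2, rfl⟩
      · exact hr y h
      · exact ⟨h1, h2⟩
    simp only [List.foldl_cons]
    rw [ih r' hnn' hr' x]
    constructor
    · rintro ⟨s', hs', u, hu, rfl, hle⟩
      rcases (hmem' s').mp hs' with h | ⟨s, hs, h1, h2, rfl⟩
      · exact ⟨s', h, u, hu.cons w, rfl, hle⟩
      · exact ⟨s, hs, w :: u, hu.cons₂ w, by simp; ring, hle⟩
    · rintro ⟨s, hs, u, hu, rfl, hle⟩
      rcases List.sublist_cons_iff.mp hu with h | ⟨u', rfl, hu'⟩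
      · refine ⟨s, (hmem' s).mpr (Or.inl hs), u, h, rfl, hle⟩
      · have hus : 0 ≤ u'.sum := sum_nonneg_of_sublist hu' hnn'
        have h0 : 0 ≤ s + w := by have := (hr s hs).1; omega
        have h2 : s + w ≤ W := by simp at hle; omega
        refine ⟨s + w, (hmem' (s + w)).mpr (Or.inr ⟨s, hs, h0, h2, rfl⟩), u', hu',
          by simp; ring, by simpa using hle⟩

-- ---- B side, W = 0: the set never leaves {0} ----

lemma B_fold_bounded (W : Int) :
    ∀ (ws : List Int) (r : PySem.Set Int), (∀ x ∈ r, 0 ≤ x ∧ x ≤ W) →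
    ∀ x ∈ ws.foldl (fun r w =>
          r.foldl (fun r2 s =>
            if 0 ≤ s + w ∧ s + w ≤ W then PySem.Set.add r2 (s + w) else r2) r) r,
    0 ≤ x ∧ x ≤ W := by
  intro ws
  induction ws with
  | nil => intro r hr x hx; exact hr x hx
  | cons w t ih =>
    intro r hr x hx
    rw [List.foldl_cons] at hx
    refine ih _ ?_ x hx
    intro y hy
    rcases (mem_inner r r w W y).mp hy with h | ⟨s, _, h1, h2, rfl⟩
    · exact hr y h
    · exact ⟨h1, h2⟩

lemma B_fold_mono (W : Int) :
    ∀ (ws : List Int) (r : PySem.Set Int) (x : Int), x ∈ r →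
    x ∈ ws.foldl (fun r w =>
          r.foldl (fun r2 s =>
            if 0 ≤ s + w ∧ s + w ≤ W then PySem.Set.add r2 (s + w) else r2) r) r := by
  intro ws
  induction ws with
  | nil => intro r x hx; exact hx
  | cons w t ih =>
    intro r x hx
    rw [List.foldl_cons]
    exact ih _ x ((mem_inner r r w W x).mpr (Or.inl hx))

lemma B_W0 (weights : List Int) : knapsack_maximize_weight_alt weights 0 = 0 := by
  unfold knapsack_maximize_weight_alt
  set R := weights.foldl
    (fun r w =>
      List.foldl (fun r2 s =>
        if 0 ≤ s + w ∧ s + w ≤ (0:Int) then PySem.Set.add r2 (s + w) else r2) r r)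
    (PySem.Set.ofList [0]) with hR
  have h0R : (0:Int) ∈ R :=
    B_fold_mono 0 weights (PySem.Set.ofList [0]) 0 (by rw [PySem.Set.mem_ofList]; simp)
  have hb : ∀ x ∈ R, 0 ≤ x ∧ x ≤ (0:Int) := by
    refine B_fold_bounded 0 weights (PySem.Set.ofList [0]) ?_
    intro x hx
    rw [PySem.Set.mem_ofList] at hx
    simp at hx
    omega
  show (match PySem.List.max? R (fun x => x) with | some m => m | none => 0) = 0
  cases hmax : PySem.List.max? R (fun x => x) with
  | none => rfl
  | some m =>
    show m = 0
    have := hb m (PySem.List.max?_mem hmax)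
    omega

lemma B_eq_bestR (weights : List Int) (W : Int) (hW : 0 ≤ W) (hnn : ∀ w ∈ weights, 0 ≤ w) :
    knapsack_maximize_weight_alt weights W = bestR weights.reverse W := by
  unfold knapsack_maximize_weight_alt
  set R := weights.foldl
    (fun r w =>
      List.foldl (fun r2 s =>
        if 0 ≤ s + w ∧ s + w ≤ W then PySem.Set.add r2 (s + w) else r2) r r)
    (PySem.Set.ofList [0]) with hR
  have hbase : ∀ x ∈ PySem.Set.ofList ([0] : List Int), 0 ≤ x ∧ x ≤ W := by
    intro x hx
    rw [PySem.Set.mem_ofList] at hx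
    simp at hx
    omega
  have hmem : ∀ x, x ∈ R ↔ ∃ t : List Int, t.Sublist weights ∧ x = t.sum ∧ x ≤ W := by
    intro x
    rw [hR, mem_B_fold weights W (PySem.Set.ofList [0]) hnn hbase x]
    constructor
    · rintro ⟨s, hs, t, ht, rfl, hle⟩
      rw [PySem.Set.mem_ofList] at hs
      simp at hs
      subst hs
      exact ⟨t, ht, by simp, by simpa using hle⟩
    · rintro ⟨t, ht, rfl, hle⟩
      exact ⟨0, by rw [PySem.Set.mem_ofList]; simp, t, ht, by simp, by simpa using hle⟩
  have h0R : (0:Int) ∈ R := (hmem 0).mpr ⟨[], List.nil_sublist _, by simp, hW⟩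
  have hnnrev : ∀ w ∈ weights.reverse, 0 ≤ w := fun w hw => hnn w (List.mem_reverse.mp hw)
  show (match PySem.List.max? R (fun x => x) with | some m => m | none => 0) = bestR weights.reverse W
  cases hmax : PySem.List.max? R (fun x => x) with
  | none =>
    rw [PySem.List.max?_eq_none_iff] at hmax
    rw [hmax] at h0R
    cases h0R
  | some m =>
    show m = bestR weights.reverse W
    have hmmem := PySem.List.max?_mem hmax
    have hmax' := PySem.List.max?_isMax hmax
    obtain ⟨t, ht, rfl, hle⟩ := (hmem m).mp hmmem
    have h1 : t.sum ≤ bestR weights.reverse W := by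
      have := bestR_ub weights.reverse W hnnrev t.reverse (by simpa using ht.reverse)
        (by rwa [List.sum_reverse])
      rwa [List.sum_reverse] at this
    have h2 : bestR weights.reverse W ≤ t.sum := by
      obtain ⟨u, hu, he, hule⟩ := bestR_exists weights.reverse W hW hnnrev
      have hu' : u.reverse.Sublist weights := by simpa using hu.reverse
      have : bestR weights.reverse W ∈ R := (hmem _).mpr
        ⟨u.reverse, hu', by rw [List.sum_reverse]; exact he, hule⟩
      exact hmax' _ this
    omega

-- ===== VERDICT (by name: the statement is the Claim_ definition above) =====
theorem knapsack_maximize_weight_spec : Claim_equal_knapsack_maximize_weight := by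
  intro weights W _ hpre
  unfold Spec_knapsack_maximize_weight
  rcases hpre with ⟨hW, h0 | hnn⟩
  · subst h0
    rw [A_W0, B_W0]
  · rw [A_eq_bestR weights W hW hnn, B_eq_bestR weights W hW hnn]
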